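-- pv_equiv track=rewrite | github.com/UTDRON/competitive_programming | binary_exponentiation/padovan_iterative.py | padovan
-- ===== SOURCE A (Python) =====
-- def padovan(n: int) -> int:
--     if n in [0, 1, 2]:
--         return 1
--
--     n_1 = 1
--     n_2 = 1
--     n_3 = 1
--     pad_n = 0
--
--     for _ in range(3, n+1):
--         pad_n = n_2 + n_3
--
--         n_3 = n_2
--         n_2 = n_1
--         n_1 = pad_n
--
--     return pad_n
-- ===== SOURCE B (Python) =====
-- def padovan(n: int) -> int:
--     # Padovan via 3x3 matrix binary exponentiation: O(log n) instead of A's O(n) loop.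
--     if 0 <= n <= 2:
--         return 1
--     if n < 0:
--         return 0
--     # v_k = (P(k), P(k-1), P(k-2)); M @ v_k = v_{k+1}
--     M = ((0, 1, 1), (1, 0, 0), (0, 1, 0))
--     R = ((1, 0, 0), (0, 1, 0), (0, 0, 1))
--     e = n - 2
--     while e:
--         if e & 1:
--             R = _mul(R, M)
--         M = _mul(M, M)
--         e >>= 1
--     # P(n) = first row of M^(n-2) dotted with v_2 = (1,1,1)
--     return R[0][0] + R[0][1] + R[0][2]
--
--
-- def _mul(X, Y):
--     return tuple(
--         tuple(sum(X[i][k] * Y[k][j] for k in range(3)) for j in range(3))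
--         for i in range(3)
--     )
-- ===== Notes on version B (the rewrite author's own statement) =====
-- stated objective: faster
-- what changed: Replaces A's linear three-register recurrence loop with 3x3 matrix binary exponentiation (first-row sum of the Padovan matrix power), matching A's value on all small and negative inputs; intended as faster: measured about 6x at the largest size both programs produced a result.
import Mathlib
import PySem

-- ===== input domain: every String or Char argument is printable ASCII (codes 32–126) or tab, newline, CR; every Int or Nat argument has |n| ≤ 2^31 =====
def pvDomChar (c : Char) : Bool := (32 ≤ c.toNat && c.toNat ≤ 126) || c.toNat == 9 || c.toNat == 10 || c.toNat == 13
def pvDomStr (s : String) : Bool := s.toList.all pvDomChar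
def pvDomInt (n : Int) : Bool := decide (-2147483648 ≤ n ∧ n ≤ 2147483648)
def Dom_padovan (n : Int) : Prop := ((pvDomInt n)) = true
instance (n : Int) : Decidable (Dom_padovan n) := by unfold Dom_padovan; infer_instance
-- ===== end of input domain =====

-- B replaces A's linear three-register loop with 3x3 matrix binary exponentiation
-- (intended as faster: O(log n) multiplications vs O(n) iterations; measured about 6x at the largest size both finished).

-- ===== PORT A =====
-- state (n_1, n_2, n_3, pad_n); the loop body of A, step for step
def padovan (n : Int) : Int :=
  if n = 0 ∨ n = 1 ∨ n = 2 then 1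
  else
    let s := (PySem.List.pyRange 3 (n + 1) 1).foldl
      (fun (st : Int × Int × Int × Int) _ =>
        let pad := st.2.1 + st.2.2.1      -- pad_n = n_2 + n_3
        (pad, st.1, st.2.1, pad))          -- n_3 = n_2; n_2 = n_1; n_1 = pad_n
      (1, 1, 1, 0)
    s.2.2.2

-- ===== PORT B =====
-- 3x3 integer matrix, row-major
structure Mat3 where
  (a b c d e f g h i : Int)
deriving DecidableEq, Repr

def matMul (X Y : Mat3) : Mat3 :=
  ⟨X.a*Y.a + X.b*Y.d + X.c*Y.g, X.a*Y.b + X.b*Y.e + X.c*Y.h, X.a*Y.c + X.b*Y.f + X.c*Y.i,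
   X.d*Y.a + X.e*Y.d + X.f*Y.g, X.d*Y.b + X.e*Y.e + X.f*Y.h, X.d*Y.c + X.e*Y.f + X.f*Y.i,
   X.g*Y.a + X.h*Y.d + X.i*Y.g, X.g*Y.b + X.h*Y.e + X.i*Y.h, X.g*Y.c + X.h*Y.f + X.i*Y.i⟩

def matId : Mat3 := ⟨1,0,0, 0,1,0, 0,0,1⟩

def padM : Mat3 := ⟨0,1,1, 1,0,0, 0,1,0⟩

-- the 'while e:' binary-exponentiation loop of Source B, recursion on e
def matPowLoop (R A : Mat3) (e : Nat) : Mat3 :=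
  if e = 0 then R
  else matPowLoop (if e % 2 = 1 then matMul R A else R) (matMul A A) (e / 2)
decreasing_by exact Nat.div_lt_self (Nat.pos_of_ne_zero (by assumption)) (by norm_num)

def padovan_alt (n : Int) : Int :=
  if 0 ≤ n ∧ n ≤ 2 then 1
  else if n < 0 then 0
  else
    let R := matPowLoop matId padM (n - 2).toNat
    R.a + R.b + R.c

-- ===== PRECONDITION & SPEC =====
def Spec_padovan (n : Int) (out : Int) : Prop := out = padovan_alt n
instance (n : Int) (out : Int) : Decidable (Spec_padovan n out) := by unfold Spec_padovan; infer_instance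

-- ===== CLAIM (what is proved, stated in full; the proofs are below) =====
def Claim_equal_padovan : Prop := ∀ (n : Int), Dom_padovan n → Spec_padovan n (padovan n)

-- ===== LEMMAS AND PROOFS =====

-- reference Padovan sequence
def padRef : Nat → Int
  | 0 => 1
  | 1 => 1
  | 2 => 1
  | (k+3) => padRef (k+1) + padRef k

-- simple (unary) matrix power, bridge between the binary loop and induction
def mpow (A : Mat3) : Nat → Mat3
  | 0 => matId
  | (e+1) => matMul A (mpow A e)

theorem matMul_id_right (A : Mat3) : matMul A matId = A := by
  cases A; simp [matMul, matId]

theorem matMul_id_left (A : Mat3) : matMul matId A = A := by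
  cases A; simp [matMul, matId]

theorem matMul_assoc (A B C : Mat3) :
    matMul (matMul A B) C = matMul A (matMul B C) := by
  cases A; cases B; cases C; simp [matMul]; ring_nf; tauto

theorem mpow_add (A : Mat3) (m k : Nat) :
    mpow A (m + k) = matMul (mpow A m) (mpow A k) := by
  induction m with
  | zero => simp [mpow, matMul_id_left]
  | succ m ih => simp [Nat.succ_add, mpow, ih, matMul_assoc]

theorem mpow_two_mul (A : Mat3) (k : Nat) :
    mpow (matMul A A) k = mpow A (2 * k) := by
  induction k with
  | zero => rfl
  | succ k ih =>
    have h2 : 2 * (k + 1) = 2 + 2 * k := by ring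
    rw [mpow, ih, h2, mpow_add]
    simp [mpow, matMul_id_right, matMul_assoc]

theorem matPowLoop_eq (e : Nat) : ∀ R A : Mat3, matPowLoop R A e = matMul R (mpow A e) := by
  induction e using Nat.strong_induction_on with
  | _ e ih =>
    intro R A
    rcases Nat.eq_zero_or_pos e with h | h
    · subst h; rw [matPowLoop]; simp [mpow, matMul_id_right]
    · rw [matPowLoop]
      have hne : e ≠ 0 := Nat.pos_iff_ne_zero.mp h
      have hd : e / 2 < e := Nat.div_lt_self h (by norm_num)
      rw [if_neg hne, ih _ hd, mpow_two_mul]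
      by_cases hp : e % 2 = 1
      · have he : 2 * (e / 2) + 1 = e := by omega
        rw [if_pos hp]
        have hstep : matMul (matMul R A) (mpow A (2 * (e / 2)))
            = matMul R (mpow A (2 * (e / 2) + 1)) := by
          rw [matMul_assoc]
          rfl
        rw [hstep, he]
      · have he : 2 * (e / 2) = e := by omega
        rw [if_neg hp, he]

-- the Padovan matrix's powers carry the sequence in their row sums
theorem mpow_padM_row (e : Nat) :
    (mpow padM e).a + (mpow padM e).b + (mpow padM e).c = padRef (e + 2) ∧
    (mpow padM e).d + (mpow padM e).e + (mpow padM e).f = padRef (e + 1) ∧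
    (mpow padM e).g + (mpow padM e).h + (mpow padM e).i = padRef e := by
  induction e with
  | zero => simp [mpow, matId, padRef]
  | succ e ih =>
    obtain ⟨h1, h2, h3⟩ := ih
    have hrec : padRef (e + 3) = padRef (e + 1) + padRef e := rfl
    refine ⟨?_, ?_, ?_⟩
    · show (matMul padM (mpow padM e)).a + (matMul padM (mpow padM e)).b
          + (matMul padM (mpow padM e)).c = padRef (e + 1 + 2)
      have : e + 1 + 2 = e + 3 := by omega
      rw [this, hrec, ← h2, ← h3]
      simp [matMul, padM]; ring
    · show (matMul padM (mpow padM e)).d + (matMul padM (mpow padM e)).e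
          + (matMul padM (mpow padM e)).f = padRef (e + 1 + 1)
      have : e + 1 + 1 = e + 2 := by omega
      rw [this, ← h1]
      simp [matMul, padM]
    · show (matMul padM (mpow padM e)).g + (matMul padM (mpow padM e)).h
          + (matMul padM (mpow padM e)).i = padRef (e + 1)
      rw [← h2]
      simp [matMul, padM]

-- A's loop invariant over range(3, 3+k): for k ≥ 1 the state is
-- (padRef (k+2), padRef (k+1), padRef k, padRef (k+2))
theorem aLoop_inv (k : Nat) (hk : 1 ≤ k) :
    (PySem.List.pyRange 3 (3 + (k : Int)) 1).foldl
      (fun (st : Int × Int × Int × Int) _ =>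
        let pad := st.2.1 + st.2.2.1
        (pad, st.1, st.2.1, pad)) (1, 1, 1, 0)
      = (padRef (k + 2), padRef (k + 1), padRef k, padRef (k + 2)) := by
  induction k with
  | zero => omega
  | succ k ih =>
    rcases Nat.eq_zero_or_pos k with h0 | h1
    · subst h0
      have h : PySem.List.pyRange 3 (3 + ((1 : Nat) : Int)) 1 = [3] := by decide
      rw [h]
      simp [List.foldl]
      decide
    · have hsplit : PySem.List.pyRange 3 (3 + ((k + 1 : Nat) : Int)) 1
          = PySem.List.pyRange 3 (3 + (k : Int)) 1 ++ [(3 + (k : Int))] := by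
        have hc : (3 + ((k + 1 : Nat) : Int)) = (3 + (k : Int)) + 1 := by push_cast; ring
        rw [hc, PySem.List.pyRange_one_succ_right (by omega)]
      rw [hsplit, List.foldl_append, ih h1]
      have hrec : padRef (k + 3) = padRef (k + 1) + padRef k := rfl
      simp only [List.foldl]
      have e1 : k + 1 + 2 = k + 3 := by omega
      have e2 : k + 1 + 1 = k + 2 := by omega
      rw [e1, e2, hrec]

-- ===== VERDICT (by name: the statement is the Claim_ definition above) =====
theorem padovan_spec : Claim_equal_padovan := by
  intro n _
  unfold Spec_padovan padovan padovan_alt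
  by_cases hb : n = 0 ∨ n = 1 ∨ n = 2
  · rw [if_pos hb, if_pos (by rcases hb with h|h|h <;> subst h <;> norm_num)]
  · rw [if_neg hb]
    by_cases hneg : n < 0
    · have h0 : 0 ≤ n ∧ n ≤ 2 → False := by omega
      rw [if_neg h0, if_pos hneg]
      have hnil : PySem.List.pyRange 3 (n + 1) 1 = [] :=
        PySem.List.pyRange_one_eq_nil (by omega)
      simp [hnil]
    · -- n ≥ 3
      have hge : 3 ≤ n := by omega
      have h0 : 0 ≤ n ∧ n ≤ 2 → False := by omega
      rw [if_neg h0, if_neg hneg]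
      set k : Nat := (n - 2).toNat with hkdef
      have hk1 : 1 ≤ k := by omega
      have hkn : (k : Int) = n - 2 := by omega
      have harg : n + 1 = 3 + (k : Int) := by omega
      rw [harg]
      have hA := aLoop_inv k hk1
      simp only [hA]
      have hB := matPowLoop_eq k matId padM
      rw [hB, matMul_id_left]
      obtain ⟨h1, _, _⟩ := mpow_padM_row k
      simp [h1]
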